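-- pv_equiv track=rewrite | github.com/acarras92/nyc-tax-dashboard | scrape_dof.py | pick_best_result
-- ===== SOURCE A (Python) =====
-- def pick_best_result(results, target_number):
--     """
--     From search results, pick the best match.
--     Prefer results whose address starts with the target house number.
--     For condos, prefer the first unit or the one without apartment suffixes.
--     """
--     if not results:
--         return None
--     if len(results) == 1:
--         return results[0]
--
--     # Prefer exact number match without apartment suffix
--     for r in results:
--         addr = r.get("address", "")
--         if addr.startswith(target_number + " ") and "#" not in addr:
--             return r
--
--     # Prefer exact number match (first one)
--     for r in results:
--         addr = r.get("address", "")
--         if addr.startswith(target_number + " "):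
--             return r
--
--     # Fall back to first result
--     return results[0]
-- ===== SOURCE B (Python) =====
-- def pick_best_result(results, target_number):
--     if not results:
--         return None
--     prefix = target_number + " "
--     first_clean = None
--     first_match = None
--     for r in results:
--         addr = r.get("address", "")
--         if addr.startswith(prefix):
--             if first_match is None:
--                 first_match = r
--             if "#" not in addr and first_clean is None:
--                 first_clean = r
--     if first_clean is not None:
--         return first_clean
--     if first_match is not None:
--         return first_match
--     return results[0]
-- ===== Notes on version B (the rewrite author's own statement) =====
-- stated objective: simpler
-- what changed: Replaced A's early-return chain with two separate scans by a single pass that maintains set-once trackers first_clean and first_match, then picks in priority order; the len==1 shortcut disappears.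
import Mathlib
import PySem

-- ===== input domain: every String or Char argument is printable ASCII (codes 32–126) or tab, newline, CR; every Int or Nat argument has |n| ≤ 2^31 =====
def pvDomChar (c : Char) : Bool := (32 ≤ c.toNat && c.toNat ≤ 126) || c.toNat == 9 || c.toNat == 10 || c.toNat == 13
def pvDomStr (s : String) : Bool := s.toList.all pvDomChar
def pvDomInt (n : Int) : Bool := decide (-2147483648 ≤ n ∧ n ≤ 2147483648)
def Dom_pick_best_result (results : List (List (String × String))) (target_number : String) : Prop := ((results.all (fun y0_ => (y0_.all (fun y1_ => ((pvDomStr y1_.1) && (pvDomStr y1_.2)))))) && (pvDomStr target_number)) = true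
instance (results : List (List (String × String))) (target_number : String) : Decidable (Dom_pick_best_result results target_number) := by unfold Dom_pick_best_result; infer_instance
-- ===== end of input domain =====

-- B replaces A's two early-return scans (plus len==1 shortcut) with one pass keeping
-- set-once first_clean / first_match trackers; objective: simpler decomposition, same cost.


-- r.get("address", "") on an association list (first match), shared Python primitive
def pvGetAddr (r : List (String × String)) : String :=
  (PySem.Dict.mk r).getD "address" ""

-- ===== PORT A =====
-- first loop of A: first r whose address starts with pref and has no '#'
def aLoopClean (rs : List (List (String × String))) (pref : String) : Option (List (String × String)) :=
  match rs with
  | [] => none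
  | r :: t =>
    let addr := pvGetAddr r
    if PySem.Str.startswith addr pref && !(PySem.Str.isIn "#" addr) then some r
    else aLoopClean t pref

-- second loop of A: first r whose address starts with pref
def aLoopMatch (rs : List (List (String × String))) (pref : String) : Option (List (String × String)) :=
  match rs with
  | [] => none
  | r :: t =>
    let addr := pvGetAddr r
    if PySem.Str.startswith addr pref then some r
    else aLoopMatch t pref

def pick_best_result (results : List (List (String × String))) (target_number : String) : Option (List (String × String)) :=
  match results with
  | [] => none
  | [r] => some r
  | r0 :: _ =>
    match aLoopClean results (target_number ++ " ") with
    | some r => some r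
    | none =>
      match aLoopMatch results (target_number ++ " ") with
      | some r => some r
      | none => some r0

-- ===== PORT B =====
-- one step of B's single pass: update the set-once (first_clean, first_match) trackers
def bStep (pref : String)
    (st : Option (List (String × String)) × Option (List (String × String)))
    (r : List (String × String)) :
    Option (List (String × String)) × Option (List (String × String)) :=
  let addr := pvGetAddr r
  if PySem.Str.startswith addr pref then
    let m := match st.2 with | none => some r | some x => some x
    let c := if !(PySem.Str.isIn "#" addr) then
               match st.1 with | none => some r | some x => some x
             else st.1
    (c, m)
  else st

def pick_best_result_alt (results : List (List (String × String))) (target_number : String) : Option (List (String × String)) :=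
  match results with
  | [] => none
  | r0 :: _ =>
    let st := results.foldl (bStep (target_number ++ " ")) (none, none)
    match st.1 with
    | some c => some c
    | none =>
      match st.2 with
      | some m => some m
      | none => some r0

-- ===== PRECONDITION & SPEC =====
def Spec_pick_best_result (results : List (List (String × String))) (target_number : String) (out : Option (List (String × String))) : Prop := out = pick_best_result_alt results target_number
instance (results : List (List (String × String))) (target_number : String) (out : Option (List (String × String))) : Decidable (Spec_pick_best_result results target_number out) := by unfold Spec_pick_best_result; infer_instance

-- ===== CLAIM (what is proved, stated in full; the proofs are below) =====
def Claim_equal_pick_best_result : Prop := ∀ (results : List (List (String × String))) (target_number : String), Dom_pick_best_result results target_number → Spec_pick_best_result results target_number (pick_best_result results target_number)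

-- ===== LEMMAS AND PROOFS =====
-- first-match combination of two trackers
def pvOr {α : Type} (a b : Option α) : Option α :=
  match a with | some x => some x | none => b

theorem foldl_bStep_eq (pref : String) (rs : List (List (String × String))) :
    ∀ c m, rs.foldl (bStep pref) (c, m) =
      (pvOr c (aLoopClean rs pref), pvOr m (aLoopMatch rs pref)) := by
  induction rs with
  | nil => intro c m; cases c <;> cases m <;> rfl
  | cons r t ih =>
    intro c m
    simp only [List.foldl_cons, aLoopClean, aLoopMatch]
    by_cases hs : PySem.Str.startswith (pvGetAddr r) pref = true
    · by_cases hi : PySem.Str.isIn "#" (pvGetAddr r) = true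
      · simp only [bStep, hs, hi, if_true, Bool.not_true, Bool.and_false]
        rw [ih]
        cases m <;> simp [pvOr]
      · simp only [bStep, hs, Bool.not_eq_true] at hi ⊢
        simp only [hi, if_true, Bool.not_false, Bool.and_true]
        rw [ih]
        cases c <;> cases m <;> simp [pvOr]
    · simp only [bStep, Bool.not_eq_true] at hs ⊢
      simp only [hs, Bool.false_and]
      exact ih c m

-- ===== VERDICT (by name: the statement is the Claim_ definition above) =====
theorem pick_best_result_spec : Claim_equal_pick_best_result := by
  intro results target_number _
  unfold Spec_pick_best_result
  match results with
  | [] => rfl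
  | [r] =>
    simp only [pick_best_result, pick_best_result_alt, foldl_bStep_eq]
    cases h1 : aLoopClean [r] (target_number ++ " ") with
    | some c =>
      have hc : c = r := by
        simp only [aLoopClean] at h1
        split at h1
        · exact (Option.some.inj h1).symm
        · exact absurd h1 (by simp)
      simp [pvOr, hc]
    | none =>
      cases h2 : aLoopMatch [r] (target_number ++ " ") with
      | some c =>
        have hc : c = r := by
          simp only [aLoopMatch] at h2
          split at h2
          · exact (Option.some.inj h2).symm
          · exact absurd h2 (by simp)
        simp [pvOr, hc]
      | none => simp [pvOr]
  | r0 :: r1 :: t =>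
    simp only [pick_best_result, pick_best_result_alt, foldl_bStep_eq]
    cases aLoopClean (r0 :: r1 :: t) (target_number ++ " ") with
    | some c => rfl
    | none =>
      cases aLoopMatch (r0 :: r1 :: t) (target_number ++ " ") <;> rfl
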